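-- pv_equiv track=rewrite | github.com/Nooirpe/FakeNewsDetection | src/Data_Preprocessing.py | simple_stemming
-- ===== SOURCE A (Python) =====
-- def simple_stemming(text):
--     if not text:
--         return ""
--
--     words = text.split()
--     stemmed_words = []
--
--     for word in words:
--         # Stemming đơn giản bằng cách loại bỏ hậu tố
--         if len(word) > 4:
--             if word.endswith('ing') and len(word) > 6:
--                 word = word[:-3]
--             elif word.endswith('ed') and len(word) > 5:
--                 word = word[:-2]
--             elif word.endswith('er') and len(word) > 5:
--                 word = word[:-2]
--             elif word.endswith('ly') and len(word) > 5:
--                 word = word[:-2]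
--             elif word.endswith('tion') and len(word) > 7:
--                 word = word[:-4]
--             elif word.endswith('ness') and len(word) > 7:
--                 word = word[:-4]
--             elif word.endswith('ment') and len(word) > 7:
--                 word = word[:-4]
--             elif word.endswith('s') and len(word) > 4:
--                 word = word[:-1]
--
--         stemmed_words.append(word)
--
--     return ' '.join(stemmed_words)
-- ===== SOURCE B (Python) =====
-- def _cut(word):
--     """Trailing characters to drop: a decision tree over the REVERSED word,
--     dispatching on the last character (each suffix has a distinct last letter,
--     except 'ness' vs 's' which share the 's' node)."""
--     r = word[::-1]
--     if not r:
--         return 0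
--     n = len(word)
--     c = r[0]
--     if c == 'g':
--         return 3 if n > 6 and r[1:3] == 'ni' else 0
--     if c == 'd':
--         return 2 if n > 5 and r[1:2] == 'e' else 0
--     if c == 'r':
--         return 2 if n > 5 and r[1:2] == 'e' else 0
--     if c == 'y':
--         return 2 if n > 5 and r[1:2] == 'l' else 0
--     if c == 'n':
--         return 4 if n > 7 and r[1:4] == 'oit' else 0
--     if c == 't':
--         return 4 if n > 7 and r[1:4] == 'nem' else 0
--     if c == 's':
--         if n > 7 and r[1:4] == 'sen':
--             return 4
--         return 1 if n > 4 else 0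
--     return 0
--
--
-- def _stem(word):
--     return word[:len(word) - _cut(word)]
--
--
-- def simple_stemming(text):
--     # single streaming pass: no split()/word list; build the output fragments directly
--     pieces = []
--     buf = []
--     for ch in text:
--         if ch.isspace():
--             if buf:
--                 if pieces:
--                     pieces.append(' ')
--                 pieces.append(_stem(''.join(buf)))
--                 buf = []
--         else:
--             buf.append(ch)
--     if buf:
--         if pieces:
--             pieces.append(' ')
--         pieces.append(_stem(''.join(buf)))
--     return ''.join(pieces)
-- ===== Notes on version B (the rewrite author's own statement) =====
-- stated objective: alternative
-- what changed: Replaces split()/per-word ordered if-elif suffix chain/join by a single streaming pass over the characters that tokenizes and emits output fragments directly, and replaces the ordered suffix scan by a decision tree on the reversed word dispatching on the last character (possible because all suffixes except 'ness'/'s' end in distinct letters).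
import Mathlib
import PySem

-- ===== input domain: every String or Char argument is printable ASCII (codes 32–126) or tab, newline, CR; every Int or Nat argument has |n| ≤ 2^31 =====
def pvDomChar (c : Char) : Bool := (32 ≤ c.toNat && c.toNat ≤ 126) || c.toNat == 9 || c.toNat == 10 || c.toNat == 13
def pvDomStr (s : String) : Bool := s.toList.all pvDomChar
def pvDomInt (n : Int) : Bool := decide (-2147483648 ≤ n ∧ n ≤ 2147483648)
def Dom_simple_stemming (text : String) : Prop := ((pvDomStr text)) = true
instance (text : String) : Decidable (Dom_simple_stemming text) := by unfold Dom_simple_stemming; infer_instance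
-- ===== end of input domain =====

-- B replaces A's split()/per-word if-elif suffix chain/join by a single streaming pass over the
-- characters that tokenizes and emits the output fragments directly, with a decision tree on the
-- reversed word dispatched on the last character instead of the ordered suffix chain (alternative
-- decomposition, same asymptotic cost).

-- ===== PORT A =====
def pvStemA (word : String) : String :=
  if PySem.Str.len word > 4 then
    if PySem.Str.endswith word "ing" = true ∧ PySem.Str.len word > 6 then
      PySem.Str.slice word none (some (-3))
    else if PySem.Str.endswith word "ed" = true ∧ PySem.Str.len word > 5 then
      PySem.Str.slice word none (some (-2))
    else if PySem.Str.endswith word "er" = true ∧ PySem.Str.len word > 5 then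
      PySem.Str.slice word none (some (-2))
    else if PySem.Str.endswith word "ly" = true ∧ PySem.Str.len word > 5 then
      PySem.Str.slice word none (some (-2))
    else if PySem.Str.endswith word "tion" = true ∧ PySem.Str.len word > 7 then
      PySem.Str.slice word none (some (-4))
    else if PySem.Str.endswith word "ness" = true ∧ PySem.Str.len word > 7 then
      PySem.Str.slice word none (some (-4))
    else if PySem.Str.endswith word "ment" = true ∧ PySem.Str.len word > 7 then
      PySem.Str.slice word none (some (-4))
    else if PySem.Str.endswith word "s" = true ∧ PySem.Str.len word > 4 then
      PySem.Str.slice word none (some (-1))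
    else word
  else word

def simple_stemming (text : String) : String :=
  if text == "" then ""
  else
    PySem.Str.join " "
      (((PySem.Str.split₀ text).foldl (fun acc w => acc ++ [pvStemA w]) []))

-- ===== PORT B =====
-- Source B's _cut: decision tree on the reversed word, dispatched on the last character
-- (str reversal r = word[::-1] and the str slices r[1:k] are ported on word.toList — exact)
-- ===== PORT B =====
-- Source B's _cut: decision tree on the reversed word, dispatched on the last character
-- (the str reversal word[::-1] and the str slices r[1:k], r[0] are ported on word.toList — exact)
def pvCutB (word : String) : Nat :=
  let r := word.toList.reverse
  if r = [] then 0
  else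
    let n := PySem.Str.len word
    let c := r.headI     -- r[0], guarded by r ≠ []
    if c = 'g' then (if n > 6 ∧ PySem.List.slice r (some 1) (some 3) = ['n','i'] then 3 else 0)
    else if c = 'd' then (if n > 5 ∧ PySem.List.slice r (some 1) (some 2) = ['e'] then 2 else 0)
    else if c = 'r' then (if n > 5 ∧ PySem.List.slice r (some 1) (some 2) = ['e'] then 2 else 0)
    else if c = 'y' then (if n > 5 ∧ PySem.List.slice r (some 1) (some 2) = ['l'] then 2 else 0)
    else if c = 'n' then (if n > 7 ∧ PySem.List.slice r (some 1) (some 4) = ['o','i','t'] then 4 else 0)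
    else if c = 't' then (if n > 7 ∧ PySem.List.slice r (some 1) (some 4) = ['n','e','m'] then 4 else 0)
    else if c = 's' then
      (if n > 7 ∧ PySem.List.slice r (some 1) (some 4) = ['s','e','n'] then 4
       else if n > 4 then 1 else 0)
    else 0

-- Source B's _stem: word[:len(word) - _cut(word)]
-- Source B's _stem: word[:len(word) - _cut(word)]
def pvStemB (word : String) : String :=
  PySem.Str.slice word none (some ((PySem.Str.len word : Int) - (pvCutB word : Int)))

-- Source B's flush of the current buffer into the output fragments
-- Source B's flush of the current word buffer into the output fragments (''.join(buf) is String.ofList — exact)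
def pvFlushB (pieces : List String) (buf : List Char) : List String :=
  (if pieces.isEmpty then pieces else pieces ++ [" "]) ++ [pvStemB (String.ofList buf)]

-- Source B's per-character step on the state (pieces, buf)
-- Source B's per-character loop body on the state (pieces, buf)
def pvStepB (st : List String × List Char) (ch : Char) : List String × List Char :=
  if PySem.Chars.isspace ch then
    (if st.2.isEmpty then st else (pvFlushB st.1 st.2, []))
  else (st.1, st.2 ++ [ch])

def simple_stemming_alt (text : String) : String :=
  let st := text.toList.foldl pvStepB ([], [])
  let pieces := if st.2.isEmpty then st.1 else pvFlushB st.1 st.2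
  PySem.Str.join "" pieces

-- ===== PRECONDITION & SPEC =====

-- ===== PRECONDITION & SPEC =====
def Spec_simple_stemming (text : String) (out : String) : Prop := out = simple_stemming_alt text
instance (text : String) (out : String) : Decidable (Spec_simple_stemming text out) := by unfold Spec_simple_stemming; infer_instance

-- ===== CLAIM (what is proved, stated in full; the proofs are below) =====
def Claim_equal_simple_stemming : Prop := ∀ (text : String), Dom_simple_stemming text → Spec_simple_stemming text (simple_stemming text)

-- ===== LEMMAS AND PROOFS =====

theorem pvCutB_le (w : String) : pvCutB w ≤ w.toList.length := by
  unfold pvCutB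
  simp only [PySem.Str.len_eq]
  split_ifs <;> simp_all <;> omega

theorem pvStemB_toList (w : String) :
    (pvStemB w).toList = w.toList.take (w.toList.length - pvCutB w) := by
  have h := pvCutB_le w
  unfold pvStemB
  simp only [PySem.Str.toList_slice, PySem.Chars.slice_eq_listSlice, PySem.Str.len_eq]
  have hs := PySem.List.slice_to (xs := w.toList) (b := (w.toList.length:Int) - (pvCutB w:Int)) (by omega)
  rw [hs]
  congr 1
  omega

-- list-level mirrors of the two cut computations, as functions of the REVERSED word
def pvCutA' (r : List Char) : Nat :=
  if (r.length : Int) > 4 then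
    if (['g','n','i'] <+: r ∧ (r.length : Int) > 6) then 3
    else if (['d','e'] <+: r ∧ (r.length : Int) > 5) then 2
    else if (['r','e'] <+: r ∧ (r.length : Int) > 5) then 2
    else if (['y','l'] <+: r ∧ (r.length : Int) > 5) then 2
    else if (['n','o','i','t'] <+: r ∧ (r.length : Int) > 7) then 4
    else if (['s','s','e','n'] <+: r ∧ (r.length : Int) > 7) then 4
    else if (['t','n','e','m'] <+: r ∧ (r.length : Int) > 7) then 4
    else if (['s'] <+: r ∧ (r.length : Int) > 4) then 1
    else 0
  else 0

def pvCutB' (r : List Char) : Nat :=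
  if r = [] then 0
  else
    if r.headI = 'g' then (if (r.length : Int) > 6 ∧ (r.drop 1).take 2 = ['n','i'] then 3 else 0)
    else if r.headI = 'd' then (if (r.length : Int) > 5 ∧ (r.drop 1).take 1 = ['e'] then 2 else 0)
    else if r.headI = 'r' then (if (r.length : Int) > 5 ∧ (r.drop 1).take 1 = ['e'] then 2 else 0)
    else if r.headI = 'y' then (if (r.length : Int) > 5 ∧ (r.drop 1).take 1 = ['l'] then 2 else 0)
    else if r.headI = 'n' then (if (r.length : Int) > 7 ∧ (r.drop 1).take 3 = ['o','i','t'] then 4 else 0)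
    else if r.headI = 't' then (if (r.length : Int) > 7 ∧ (r.drop 1).take 3 = ['n','e','m'] then 4 else 0)
    else if r.headI = 's' then
      (if (r.length : Int) > 7 ∧ (r.drop 1).take 3 = ['s','e','n'] then 4
       else if (r.length : Int) > 4 then 1 else 0)
    else 0

set_option maxHeartbeats 2000000 in
theorem pvCut_core (r : List Char) : pvCutA' r = pvCutB' r := by
  rcases r with _ | ⟨a, rest⟩
  · rfl
  · have c1 : ∀ (x : Char), ([x] <+: a::rest) ↔ a = x := by
      intro x
      simp only [List.cons_prefix_cons, List.nil_prefix, and_true]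
      exact eq_comm
    have c2 : ∀ (x y : Char), ([x,y] <+: a::rest) ↔ (a = x ∧ rest.take 1 = [y]) := by
      intro x y
      rw [List.prefix_iff_eq_take]
      simp [List.take_succ_cons, eq_comm]
    have c3 : ∀ (x y z : Char), ([x,y,z] <+: a::rest) ↔ (a = x ∧ rest.take 2 = [y,z]) := by
      intro x y z
      rw [List.prefix_iff_eq_take]
      simp [List.take_succ_cons, eq_comm]
    have c4 : ∀ (x y z u : Char), ([x,y,z,u] <+: a::rest) ↔ (a = x ∧ rest.take 3 = [y,z,u]) := by
      intro x y z u
      rw [List.prefix_iff_eq_take]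
      simp [List.take_succ_cons, eq_comm]
    simp only [pvCutA', pvCutB', c1, c2, c3, c4, List.headI_cons, List.drop_one, List.tail_cons,
      List.cons_ne_nil, if_false]
    by_cases hg : a = 'g'
    · simp only [hg, show ('g':Char) = 'd' ↔ False from by decide, show ('g':Char) = 'r' ↔ False from by decide, show ('g':Char) = 'y' ↔ False from by decide, show ('g':Char) = 'n' ↔ False from by decide, show ('g':Char) = 't' ↔ False from by decide, show ('g':Char) = 's' ↔ False from by decide,
        false_and, if_false, true_and, if_pos]
      split_ifs <;> first | rfl | omega | tauto
    by_cases hd : a = 'd'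
    · simp only [hd, show ('d':Char) = 'g' ↔ False from by decide, show ('d':Char) = 'r' ↔ False from by decide, show ('d':Char) = 'y' ↔ False from by decide, show ('d':Char) = 'n' ↔ False from by decide, show ('d':Char) = 't' ↔ False from by decide, show ('d':Char) = 's' ↔ False from by decide,
        false_and, if_false, true_and, if_pos]
      split_ifs <;> first | rfl | omega | tauto
    by_cases hr : a = 'r'
    · simp only [hr, show ('r':Char) = 'g' ↔ False from by decide, show ('r':Char) = 'd' ↔ False from by decide, show ('r':Char) = 'y' ↔ False from by decide, show ('r':Char) = 'n' ↔ False from by decide, show ('r':Char) = 't' ↔ False from by decide, show ('r':Char) = 's' ↔ False from by decide,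
        false_and, if_false, true_and, if_pos]
      split_ifs <;> first | rfl | omega | tauto
    by_cases hy : a = 'y'
    · simp only [hy, show ('y':Char) = 'g' ↔ False from by decide, show ('y':Char) = 'd' ↔ False from by decide, show ('y':Char) = 'r' ↔ False from by decide, show ('y':Char) = 'n' ↔ False from by decide, show ('y':Char) = 't' ↔ False from by decide, show ('y':Char) = 's' ↔ False from by decide,
        false_and, if_false, true_and, if_pos]
      split_ifs <;> first | rfl | omega | tauto
    by_cases hn : a = 'n'
    · simp only [hn, show ('n':Char) = 'g' ↔ False from by decide, show ('n':Char) = 'd' ↔ False from by decide, show ('n':Char) = 'r' ↔ False from by decide, show ('n':Char) = 'y' ↔ False from by decide, show ('n':Char) = 't' ↔ False from by decide, show ('n':Char) = 's' ↔ False from by decide,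
        false_and, if_false, true_and, if_pos]
      split_ifs <;> first | rfl | omega | tauto
    by_cases ht : a = 't'
    · simp only [ht, show ('t':Char) = 'g' ↔ False from by decide, show ('t':Char) = 'd' ↔ False from by decide, show ('t':Char) = 'r' ↔ False from by decide, show ('t':Char) = 'y' ↔ False from by decide, show ('t':Char) = 'n' ↔ False from by decide, show ('t':Char) = 's' ↔ False from by decide,
        false_and, if_false, true_and, if_pos]
      split_ifs <;> first | rfl | omega | tauto
    by_cases hs : a = 's'
    · simp only [hs, show ('s':Char) = 'g' ↔ False from by decide, show ('s':Char) = 'd' ↔ False from by decide, show ('s':Char) = 'r' ↔ False from by decide, show ('s':Char) = 'y' ↔ False from by decide, show ('s':Char) = 'n' ↔ False from by decide, show ('s':Char) = 't' ↔ False from by decide,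
        false_and, if_false, true_and, if_pos]
      split_ifs <;> first | rfl | omega | tauto
    · simp only [eq_false hg, eq_false hd, eq_false hr, eq_false hy, eq_false hn, eq_false ht,
        eq_false hs, false_and, if_false, ite_self]

theorem pvCutB_eq (w : String) : pvCutB w = pvCutB' w.toList.reverse := by
  have s13 : ∀ (r : List Char), PySem.List.slice r (some 1) (some 3) = (r.drop 1).take 2 := by
    intro r
    have h := PySem.List.slice_toNat (xs := r) (a := 1) (b := 3) (by omega) (by omega)
    simpa using h
  have s12 : ∀ (r : List Char), PySem.List.slice r (some 1) (some 2) = (r.drop 1).take 1 := by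
    intro r
    have h := PySem.List.slice_toNat (xs := r) (a := 1) (b := 2) (by omega) (by omega)
    simpa using h
  have s14 : ∀ (r : List Char), PySem.List.slice r (some 1) (some 4) = (r.drop 1).take 3 := by
    intro r
    have h := PySem.List.slice_toNat (xs := r) (a := 1) (b := 4) (by omega) (by omega)
    simpa using h
  unfold pvCutB pvCutB'
  simp only [PySem.Str.len_eq, s13, s12, s14, List.length_reverse]
  norm_cast

set_option maxHeartbeats 1000000 in
theorem pvStemA_toList (w : String) :
    (pvStemA w).toList = w.toList.take (w.toList.length - pvCutA' w.toList.reverse) := by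
  have t3 : (PySem.Str.slice w none (some (-3))).toList = w.toList.take (w.toList.length - 3) := by
    simp only [PySem.Str.toList_slice, PySem.Chars.slice_eq_listSlice]
    exact PySem.List.slice_to_neg_ofNat w.toList 3 (by omega)
  have t2 : (PySem.Str.slice w none (some (-2))).toList = w.toList.take (w.toList.length - 2) := by
    simp only [PySem.Str.toList_slice, PySem.Chars.slice_eq_listSlice]
    exact PySem.List.slice_to_neg_ofNat w.toList 2 (by omega)
  have t4 : (PySem.Str.slice w none (some (-4))).toList = w.toList.take (w.toList.length - 4) := by
    simp only [PySem.Str.toList_slice, PySem.Chars.slice_eq_listSlice]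
    exact PySem.List.slice_to_neg_ofNat w.toList 4 (by omega)
  have t1 : (PySem.Str.slice w none (some (-1))).toList = w.toList.take (w.toList.length - 1) := by
    simp only [PySem.Str.toList_slice, PySem.Chars.slice_eq_listSlice,
      PySem.List.slice_to_neg_one, List.dropLast_eq_take]
  have hrev : ∀ (p : String), (PySem.Str.endswith w p = true) ↔ p.toList.reverse <+: w.toList.reverse := by
    intro p
    rw [PySem.Str.endswith_eq, PySem.Chars.endswith_iff, ← List.reverse_prefix]
  have hing := hrev "ing"
  have hed := hrev "ed"
  have her := hrev "er"
  have hly := hrev "ly"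
  have htion := hrev "tion"
  have hness := hrev "ness"
  have hment := hrev "ment"
  have hs := hrev "s"
  rw [show ("ing" : String).toList.reverse = ['g','n','i'] from by decide] at hing
  rw [show ("ed" : String).toList.reverse = ['d','e'] from by decide] at hed
  rw [show ("er" : String).toList.reverse = ['r','e'] from by decide] at her
  rw [show ("ly" : String).toList.reverse = ['y','l'] from by decide] at hly
  rw [show ("tion" : String).toList.reverse = ['n','o','i','t'] from by decide] at htion
  rw [show ("ness" : String).toList.reverse = ['s','s','e','n'] from by decide] at hness
  rw [show ("ment" : String).toList.reverse = ['t','n','e','m'] from by decide] at hment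
  rw [show ("s" : String).toList.reverse = ['s'] from by decide] at hs
  unfold pvStemA pvCutA'
  simp only [apply_ite String.toList, t3, t2, t4, t1, hing, hed, her, hly, htion, hness, hment, hs,
    PySem.Str.len_eq, List.length_reverse]
  split_ifs <;> simp

theorem pvStem_eq (w : String) : pvStemA w = pvStemB w := by
  refine String.toList_inj.mp ?_
  rw [pvStemA_toList, pvStemB_toList, pvCutB_eq, pvCut_core]

theorem pvJoin_cons₂ (s a b : String) (t : List String) :
    PySem.Str.join s (a :: b :: t) = a ++ s ++ PySem.Str.join s (b :: t) := by
  refine String.toList_inj.mp ?_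
  simp [PySem.Chars.join_cons_cons]

theorem pvJoin_single (s w : String) : PySem.Str.join s [w] = w := by
  refine String.toList_inj.mp ?_
  simp [PySem.Chars.join_singleton]

theorem pvJoin_snoc (s w : String) : ∀ (ws : List String), ws ≠ [] →
    PySem.Str.join s (ws ++ [w]) = PySem.Str.join s ws ++ s ++ w := by
  intro ws
  induction ws with
  | nil => intro h; exact absurd rfl h
  | cons a t ih =>
    intro _
    cases t with
    | nil => simp [pvJoin_cons₂, pvJoin_single]
    | cons b t' =>
      rw [show a :: (b :: t') ++ [w] = a :: (b :: (t' ++ [w])) from by simp]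
      rw [pvJoin_cons₂ s a b (t' ++ [w])]
      rw [show (b :: (t' ++ [w])) = (b :: t') ++ [w] from by simp]
      rw [ih (by simp), pvJoin_cons₂ s a b t']
      refine String.toList_inj.mp ?_
      simp

-- canonical fragment list of a word list (what Source B's pieces hold after emitting ws)
def pvFrags (ws : List String) : List String :=
  ws.foldl (fun p w => (if p.isEmpty then p else p ++ [" "]) ++ [w]) []

theorem pvFrags_snoc (ws : List String) (w : String) :
    pvFrags (ws ++ [w]) = (if (pvFrags ws).isEmpty then pvFrags ws else pvFrags ws ++ [" "]) ++ [w] := by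
  simp [pvFrags, List.foldl_append]

theorem pvFrags_nil_iff (ws : List String) : pvFrags ws = [] ↔ ws = [] := by
  induction ws using List.reverseRecOn with
  | nil => simp [pvFrags]
  | append_singleton t w ih => rw [pvFrags_snoc]; split_ifs <;> simp

theorem pvFrags_join (ws : List String) :
    PySem.Str.join "" (pvFrags ws) = PySem.Str.join " " ws := by
  induction ws using List.reverseRecOn with
  | nil => rfl
  | append_singleton t w ih =>
    rw [pvFrags_snoc]
    by_cases ht : t = []
    · subst ht; simp [pvFrags, pvJoin_single]
    · have hne : (pvFrags t).isEmpty = false := by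
        simp [pvFrags_nil_iff, ht]
      rw [hne]
      simp only [Bool.false_eq_true, if_false]
      rw [pvJoin_snoc "" w (pvFrags t ++ [" "]) (by simp)]
      rw [pvJoin_snoc "" " " (pvFrags t) (fun h => ht ((pvFrags_nil_iff t).mp h))]
      rw [ih, pvJoin_snoc " " w t ht]
      refine String.toList_inj.mp ?_
      simp

theorem pvFlush_frags (ws : List String) (b : List Char) :
    pvFlushB (pvFrags ws) b = pvFrags (ws ++ [pvStemB (String.ofList b)]) := by
  rw [pvFrags_snoc]; rfl

theorem pvLoop : ∀ (l cur : List Char) (acc : List (List Char)),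
    (PySem.Str.join ""
      (let st := l.foldl pvStepB (pvFrags (acc.reverse.map (fun c => pvStemB (String.ofList c))), cur.reverse)
       if st.2.isEmpty then st.1 else pvFlushB st.1 st.2))
    = PySem.Str.join " " ((PySem.Chars.split₀.go l cur acc).map (fun c => pvStemB (String.ofList c))) := by
  intro l
  induction l with
  | nil =>
    intro cur acc
    simp only [List.foldl_nil, PySem.Chars.split₀.go]
    rcases cur with _ | ⟨c, ct⟩
    · simp only [List.reverse_nil, List.isEmpty_nil, if_true]
      exact pvFrags_join _
    · simp only [List.isEmpty_eq_false_iff (α := Char) |>.mpr (by simp : (c :: ct).reverse ≠ []),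
        List.isEmpty_cons, Bool.false_eq_true, if_false]
      rw [pvFlush_frags]
      rw [pvFrags_join]
      congr 1
      simp
  | cons ch rest ih =>
    intro cur acc
    simp only [List.foldl_cons]
    by_cases hsp : PySem.Chars.isspace ch = true
    · rcases cur with _ | ⟨c, ct⟩
      · rw [show pvStepB (pvFrags ((acc.reverse.map (fun c => pvStemB (String.ofList c)))), (List.nil (α := Char)).reverse) ch
              = (pvFrags ((acc.reverse.map (fun c => pvStemB (String.ofList c)))), (List.nil (α := Char)).reverse) from by
            simp [pvStepB, hsp]]
        rw [ih [] acc]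
        rw [show PySem.Chars.split₀.go (ch :: rest) [] acc = PySem.Chars.split₀.go rest [] acc from by
            simp [PySem.Chars.split₀.go, hsp]]
      · rw [show PySem.Chars.split₀.go (ch :: rest) (c :: ct) acc
              = PySem.Chars.split₀.go rest [] ((c :: ct).reverse :: acc) from by
            simp [PySem.Chars.split₀.go, hsp]]
        rw [← ih [] ((c :: ct).reverse :: acc)]
        rw [show pvStepB (pvFrags ((acc.reverse.map (fun c => pvStemB (String.ofList c)))), (c :: ct).reverse) ch
              = (pvFrags ((((c :: ct).reverse :: acc).reverse.map (fun c => pvStemB (String.ofList c)))), (List.nil (α := Char)).reverse) from by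
            simp [pvStepB, hsp, pvFlush_frags]]
    · rw [show pvStepB (pvFrags ((acc.reverse.map (fun c => pvStemB (String.ofList c)))), cur.reverse) ch
            = (pvFrags ((acc.reverse.map (fun c => pvStemB (String.ofList c)))), (ch :: cur).reverse) from by
          simp [pvStepB, hsp]]
      rw [ih (ch :: cur) acc]
      rw [show PySem.Chars.split₀.go (ch :: rest) cur acc = PySem.Chars.split₀.go rest (ch :: cur) acc from by
          simp [PySem.Chars.split₀.go, hsp]]

-- ===== VERDICT (by name: the statement is the Claim_ definition above) =====
theorem simple_stemming_spec : Claim_equal_simple_stemming := by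
  intro text _
  unfold Spec_simple_stemming simple_stemming simple_stemming_alt
  by_cases h : text == ""
  · rw [if_pos h]
    have : text = "" := by simpa using h
    subst this
    decide
  · rw [if_neg h, PySem.List.foldl_append_singleton_eq_map]
    have hl := pvLoop text.toList [] []
    simp only [List.reverse_nil, List.map_nil, show pvFrags [] = [] from rfl] at hl
    have hmap : (PySem.Str.split₀ text).map pvStemA
        = (PySem.Chars.split₀ text.toList).map (fun c => pvStemB (String.ofList c)) := by
      rw [← PySem.Str.split₀_map_toList, List.map_map]
      refine List.map_congr_left ?_
      intro w _
      simp [pvStem_eq w]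
    simp only [List.nil_append]
    rw [hmap]
    rw [show PySem.Chars.split₀.go text.toList [] [] = PySem.Chars.split₀ text.toList from rfl] at hl
    exact hl.symm
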